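-- pv_equiv track=rewrite | github.com/yannickloth/W33-Theory | exploration/GRAND_SYNTHESIS_FEB4_2026.py | intersection_product
-- ===== SOURCE A (Python) =====
-- def support(c):
--     return frozenset(i for i, x in enumerate(c) if x != 0)
--
-- def intersection_product(c1, c2):
--     H1, H2 = support(c1), support(c2)
--     inter = H1 & H2
--     if len(inter) != 3:
--         return None
--     prod = 1
--     for i in inter:
--         prod = (prod * c1[i] * c2[i]) % 3
--     return prod
-- ===== SOURCE B (Python) =====
-- def intersection_product(c1, c2):
--     prods = [x * y for x, y in zip(c1, c2) if x != 0 and y != 0]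
--     if len(prods) != 3:
--         return None
--     r = 1
--     for q in prods:
--         r = (r * q) % 3
--     return r
-- ===== Notes on version B (the rewrite author's own statement) =====
-- stated objective: simpler
-- what changed: One combined pass over zip(c1, c2) collecting the products at common-support positions replaces building two frozenset supports, intersecting them, and indexing back into both lists.
import Mathlib
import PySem

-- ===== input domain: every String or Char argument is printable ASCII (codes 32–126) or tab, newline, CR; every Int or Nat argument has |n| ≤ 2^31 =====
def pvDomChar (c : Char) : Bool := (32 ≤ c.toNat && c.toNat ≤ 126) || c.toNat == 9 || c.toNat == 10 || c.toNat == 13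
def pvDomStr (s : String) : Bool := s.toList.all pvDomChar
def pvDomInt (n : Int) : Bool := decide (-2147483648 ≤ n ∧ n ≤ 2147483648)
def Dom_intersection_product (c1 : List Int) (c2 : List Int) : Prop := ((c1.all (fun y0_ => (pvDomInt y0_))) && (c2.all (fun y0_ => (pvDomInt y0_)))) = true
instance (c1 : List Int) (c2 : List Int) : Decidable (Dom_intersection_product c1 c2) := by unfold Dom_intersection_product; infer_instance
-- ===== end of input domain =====

-- B replaces the support-sets-and-intersection construction by one combined pass over
-- zip(c1, c2) collecting the common-support products (objective: simpler).

-- ===== PORT A =====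
-- support(c): frozenset of indices with nonzero entry
def pvSupport (c : List Int) : PySem.Set Int :=
  PySem.Set.ofList (((PySem.List.enumerate c).filter (fun p => p.2 != 0)).map (fun p => p.1))

-- the for-loop over the frozenset 'inter' is folded in the Set's list order; the result
-- (an iterated product mod 3) does not depend on the iteration order, so this is exact.
def intersection_product (c1 : List Int) (c2 : List Int) : Option Int :=
  let H1 := pvSupport c1
  let H2 := pvSupport c2
  let inter := PySem.Set.inter H1 H2
  if PySem.Set.len inter ≠ 3 then none
  else some (inter.foldl
    (fun prod i => PySem.Int.mod (prod * PySem.List.pyGetD c1 i 0 * PySem.List.pyGetD c2 i 0) 3) 1)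

-- ===== PORT B =====
def intersection_product_alt (c1 : List Int) (c2 : List Int) : Option Int :=
  let prods := ((c1.zip c2).filter (fun p => p.1 != 0 && p.2 != 0)).map (fun p => p.1 * p.2)
  if prods.length ≠ 3 then none
  else some (prods.foldl (fun r q => PySem.Int.mod (r * q) 3) 1)

-- ===== PRECONDITION & SPEC =====
def Spec_intersection_product (c1 : List Int) (c2 : List Int) (out : Option Int) : Prop := out = intersection_product_alt c1 c2
instance (c1 : List Int) (c2 : List Int) (out : Option Int) : Decidable (Spec_intersection_product c1 c2 out) := by unfold Spec_intersection_product; infer_instance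

-- ===== CLAIM (what is proved, stated in full; the proofs are below) =====
def Claim_equal_intersection_product : Prop := ∀ (c1 : List Int) (c2 : List Int), Dom_intersection_product c1 c2 → Spec_intersection_product c1 c2 (intersection_product c1 c2)

-- ===== LEMMAS AND PROOFS =====

-- the common index list both programs effectively traverse
def pvIdx (c1 c2 : List Int) : List Nat :=
  (List.range (min c1.length c2.length)).filter (fun k => c1.getD k 0 != 0 && c2.getD k 0 != 0)

theorem pvSupport_eq (c : List Int) :
    pvSupport c = ((List.range c.length).filter (fun k => c.getD k 0 != 0)).map (fun k : Nat => (k : Int)) := by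
  unfold pvSupport
  rw [PySem.List.enumerate_eq_map_pyRange c 0, PySem.List.len_eq, PySem.List.pyRange_zero_natCast,
    List.map_map, List.filter_map, List.map_map]
  have hfun : ((fun p : Int × Int => p.2 != 0) ∘ (fun j => (j, PySem.List.pyGetD c j 0)) ∘ (fun k : Nat => (k : Int)))
      = fun k : Nat => c.getD k 0 != 0 := by
    funext k; simp [Function.comp, PySem.List.pyGetD_natCast]
  have hfst : ((fun p : Int × Int => p.1) ∘ (fun j => (j, PySem.List.pyGetD c j 0)) ∘ (fun k : Nat => (k : Int)))
      = fun k : Nat => (k : Int) := rfl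
  rw [hfun, hfst]
  apply PySem.Set.ofList_eq_self_of_nodup
  refine List.Nodup.map (fun a b h => by exact_mod_cast h) ?_
  exact (List.nodup_range).filter _

theorem pv_filter_range_lt (n1 n2 : Nat) (r : Nat → Bool) :
    (List.range n1).filter (fun k => decide (k < n2) && r k) = (List.range (min n1 n2)).filter r := by
  induction n1 with
  | zero => simp
  | succ n ih =>
    rw [List.range_succ, List.filter_append, ih]
    by_cases h : n < n2
    · have : min (n + 1) n2 = min n n2 + 1 := by omega
      have hm : min n n2 = n := by omega
      rw [this, List.range_succ, List.filter_append, hm]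
      simp [List.filter_singleton, h]
    · have : min (n + 1) n2 = min n n2 := by omega
      simp [this, h]

theorem pv_contains_support (c2 : List Int) (k : Nat) :
    PySem.Set.contains (((List.range c2.length).filter (fun k => c2.getD k 0 != 0)).map (fun k : Nat => (k : Int))) (k : Int)
      = (decide (k < c2.length) && (c2.getD k 0 != 0)) := by
  rw [Bool.eq_iff_iff, PySem.Set.contains_iff]
  simp only [List.mem_map, List.mem_filter, List.mem_range, Bool.and_eq_true, decide_eq_true_eq]
  constructor
  · rintro ⟨a, ⟨ha1, ha2⟩, hc⟩
    have : a = k := by exact_mod_cast hc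
    subst this; exact ⟨ha1, ha2⟩
  · exact fun ⟨h1, h2⟩ => ⟨k, ⟨h1, h2⟩, rfl⟩

theorem pv_inter_eq (c1 c2 : List Int) :
    PySem.Set.inter (pvSupport c1) (pvSupport c2) = (pvIdx c1 c2).map (fun k : Nat => (k : Int)) := by
  unfold PySem.Set.inter pvIdx
  rw [pvSupport_eq c1, pvSupport_eq c2, List.filter_map, List.filter_filter]
  congr 1
  have hpred : ∀ x ∈ List.range c1.length,
      (((fun i => PySem.Set.contains (((List.range c2.length).filter (fun k => c2.getD k 0 != 0)).map (fun k : Nat => (k : Int))) i) ∘ (fun k : Nat => (k : Int))) x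
        && (c1.getD x 0 != 0))
      = (decide (x < c2.length) && (c1.getD x 0 != 0 && c2.getD x 0 != 0)) := by
    intro x _
    simp only [Function.comp, pv_contains_support c2 x]
    cases h1 : (c1.getD x 0 != 0) <;> cases h2 : (c2.getD x 0 != 0) <;> cases h3 : decide (x < c2.length) <;> rfl
  rw [List.filter_congr hpred, pv_filter_range_lt]
theorem pv_zip_eq (c1 c2 : List Int) :
    c1.zip c2 = (List.range (min c1.length c2.length)).map (fun k => (c1.getD k 0, c2.getD k 0)) := by
  apply List.ext_getElem
  · simp
  · intro i h1 h2
    simp only [List.getElem_map, List.getElem_range, List.getElem_zip]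
    rw [List.length_zip] at h1
    rw [List.getD_eq_getElem _ _ (by omega), List.getD_eq_getElem _ _ (by omega)]

theorem pv_prods_eq (c1 c2 : List Int) :
    ((c1.zip c2).filter (fun p => p.1 != 0 && p.2 != 0)).map (fun p => p.1 * p.2)
      = (pvIdx c1 c2).map (fun k => c1.getD k 0 * c2.getD k 0) := by
  rw [pv_zip_eq, List.filter_map, List.map_map]
  unfold pvIdx
  rfl

-- ===== VERDICT (by name: the statement is the Claim_ definition above) =====
theorem intersection_product_spec : Claim_equal_intersection_product := by
  intro c1 c2 _
  unfold Spec_intersection_product intersection_product intersection_product_alt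
  simp only [pv_inter_eq, pv_prods_eq, PySem.Set.len, List.length_map, List.foldl_map]
  have hg : (fun (p : Int) (k : Nat) => PySem.Int.mod (p * PySem.List.pyGetD c1 (k : Int) 0 * PySem.List.pyGetD c2 (k : Int) 0) 3)
      = (fun (p : Int) (k : Nat) => PySem.Int.mod (p * (c1.getD k 0 * c2.getD k 0)) 3) := by
    funext p k
    rw [PySem.List.pyGetD_natCast, PySem.List.pyGetD_natCast, mul_assoc]
  rw [hg]
  by_cases h : (pvIdx c1 c2).length = 3
  · simp [h]
  · have h' : ((pvIdx c1 c2).length : Int) ≠ 3 := by exact_mod_cast h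
    simp [h, h']
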